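-- pv_equiv track=rewrite | github.com/LCS2-IIITD/DiVA | app/__init__.py | outputIterations
-- ===== SOURCE A (Python) =====
-- def outputIterations(iteration_results):
--     output = {}
--     nodes_iter = {}
--     for keys in iteration_results[0]['node_count']:
--         output[keys]=[]
--         nodes_iter[keys] = []
--     for iteration in iteration_results:
--         for keys in nodes_iter:
--             nodes_iter[keys] = []
--         status = iteration['status']
--         for node in status:
--             nodes_iter[status[node]].append(node)
--         for keys in nodes_iter:
--             output[keys].append(nodes_iter[keys])
--
--     return output
-- ===== SOURCE B (Python) =====
-- def outputIterations(iteration_results):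
--     statuses = [iteration['status'] for iteration in iteration_results]
--     return {
--         keys: [[node for node in status if status[node] == keys] for status in statuses]
--         for keys in iteration_results[0]['node_count']
--     }
-- ===== Notes on version B (the rewrite author's own statement) =====
-- stated objective: simpler
-- what changed: Drops A's stateful per-iteration grouping dict (reset loop, append loop, copy-into-output loop) entirely: B builds the result in one dict comprehension that, for each status key, selects each iteration's matching nodes by filtering that iteration's status mapping.
-- outside the precondition, e.g. on outputIterations([]): A raises IndexError, B raises IndexError; on outputIterations([{'node_count': {'a': '1'}, 'status': {'n1': 'b'}}]): A raises KeyError, B returns {'a': [[]]}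
import Mathlib
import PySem

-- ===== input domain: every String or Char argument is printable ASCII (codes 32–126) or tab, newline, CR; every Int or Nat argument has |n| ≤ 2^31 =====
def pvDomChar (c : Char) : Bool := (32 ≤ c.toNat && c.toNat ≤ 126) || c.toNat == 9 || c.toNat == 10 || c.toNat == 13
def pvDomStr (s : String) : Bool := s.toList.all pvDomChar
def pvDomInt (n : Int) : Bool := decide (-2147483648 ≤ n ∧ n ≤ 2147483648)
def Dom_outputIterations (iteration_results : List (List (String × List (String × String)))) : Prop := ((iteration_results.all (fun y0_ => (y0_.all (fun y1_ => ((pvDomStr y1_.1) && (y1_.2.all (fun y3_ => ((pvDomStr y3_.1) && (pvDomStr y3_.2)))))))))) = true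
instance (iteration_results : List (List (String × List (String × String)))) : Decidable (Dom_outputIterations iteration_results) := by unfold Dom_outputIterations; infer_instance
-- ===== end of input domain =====

-- B is SIMPLER, not faster: one dict comprehension replaces A's stateful grouping dict with its reset/append/copy loops.

-- ===== PORT A =====
-- inner loop: 'for node in status: nodes_iter[status[node]].append(node)' (none = KeyError)
def aInner : List (String × String) → PySem.Dict String String → PySem.Dict String (List String) → Option (PySem.Dict String (List String))
  | [], _, ni => some ni
  | p :: rest, stD, ni =>
    match stD.get? p.1 with
    | none => none
    | some v =>
      match ni.get? v with
      | none => none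
      | some lst => aInner rest stD (ni.insert v (lst ++ [p.1]))

-- last loop: 'for keys in nodes_iter: output[keys].append(nodes_iter[keys])'
def aAppend : List String → PySem.Dict String (List String) → PySem.Dict String (List (List String)) → Option (PySem.Dict String (List (List String)))
  | [], _, out => some out
  | k :: rest, ni, out =>
    match ni.get? k, out.get? k with
    | some g, some lst => aAppend rest ni (out.insert k (lst ++ [g]))
    | _, _ => none

-- main loop: 'for iteration in iteration_results: …'
def aOuter : List (List (String × List (String × String))) → PySem.Dict String (List (List String)) → PySem.Dict String (List String) → Option (PySem.Dict String (List (List String)))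
  | [], out, _ => some out
  | it :: rest, out, ni =>
    let ni1 := ni.keys.foldl (fun d k => d.insert k ([] : List String)) ni
    match (PySem.Dict.mk it).get? "status" with
    | none => none
    | some st =>
      match aInner st (PySem.Dict.mk st) ni1 with
      | none => none
      | some ni2 =>
        match aAppend ni2.keys ni2 out with
        | none => none
        | some out2 => aOuter rest out2 ni2

def outputIterations (iteration_results : List (List (String × List (String × String)))) : List (String × List (List String)) :=
  match PySem.List.pyGet? iteration_results 0 with
  | none => []        -- IndexError: outside Pre_
  | some it0 =>
    match (PySem.Dict.mk it0).get? "node_count" with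
    | none => []      -- KeyError: outside Pre_
    | some nc =>
      -- 'for keys in iteration_results[0]["node_count"]: output[keys]=[]; nodes_iter[keys]=[]'
      let init := nc.foldl
        (fun q p => (q.1.insert p.1 ([] : List (List String)), q.2.insert p.1 ([] : List String)))
        ((PySem.Dict.empty : PySem.Dict String (List (List String))), (PySem.Dict.empty : PySem.Dict String (List String)))
      match aOuter iteration_results init.1 init.2 with
      | none => []    -- KeyError inside the loops: outside Pre_
      | some out => out.items

-- ===== PORT B =====
-- '[node for node in status if status[node] == keys]'
def bGroup (st : List (String × String)) (k : String) : List String :=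
  (st.filter (fun p => (PySem.Dict.mk st).get? p.1 == some k)).map (·.1)

def outputIterations_alt (iteration_results : List (List (String × List (String × String)))) : List (String × List (List String)) :=
  match iteration_results.mapM (fun it => (PySem.Dict.mk it).get? "status") with
  | none => []        -- KeyError 'status': outside Pre_
  | some statuses =>
    match PySem.List.pyGet? iteration_results 0 with
    | none => []      -- IndexError: outside Pre_
    | some it0 =>
      match (PySem.Dict.mk it0).get? "node_count" with
      | none => []    -- KeyError 'node_count': outside Pre_
      | some nc =>
        (nc.foldl (fun d p => d.insert p.1 (statuses.map (fun st => bGroup st p.1))) PySem.Dict.empty).items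

-- ===== PRECONDITION & SPEC =====
-- the 'status' dict of an iteration (as stored; [] only when absent, which PreCore_ rules out)
def stOf (it : List (String × List (String × String))) : List (String × String) :=
  ((PySem.Dict.mk it).get? "status").getD []

-- the first iteration's 'node_count' dict
def ncOf (iteration_results : List (List (String × List (String × String)))) : List (String × String) :=
  ((PySem.Dict.mk (iteration_results.headD [])).get? "node_count").getD []

-- shape part: nonempty, first has 'node_count', every element has 'status'
def PreCore_outputIterations (iteration_results : List (List (String × List (String × String)))) : Prop :=
  iteration_results ≠ [] ∧
  (PySem.Dict.mk (iteration_results.headD [])).contains "node_count" = true ∧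
  ∀ it ∈ iteration_results, (PySem.Dict.mk it).contains "status" = true

-- value part: every status value is a key of the first iteration's node_count
def GoodVals_outputIterations (iteration_results : List (List (String × List (String × String)))) : Prop :=
  ∀ it ∈ iteration_results, ∀ p ∈ stOf it,
    ((PySem.Dict.mk (stOf it)).getD p.1 "") ∈ (ncOf iteration_results).map (·.1)

-- Pre_ excludes exactly the inputs where A raises: IndexError on [], KeyError on a missing
-- 'node_count'/'status' key, and KeyError on a status value that is not a node_count key.
def Pre_outputIterations (iteration_results : List (List (String × List (String × String)))) : Prop :=
  PreCore_outputIterations iteration_results ∧ GoodVals_outputIterations iteration_results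

instance (iteration_results : List (List (String × List (String × String)))) : Decidable (Pre_outputIterations iteration_results) := by
  unfold Pre_outputIterations PreCore_outputIterations GoodVals_outputIterations; infer_instance

def pvWitness_outputIterations : (List (List (String × List (String × String)))) :=
  [[("node_count", [("a", "1"), ("b", "2")]), ("status", [("n1", "a"), ("n2", "a")])],
   [("node_count", [("a", "1"), ("b", "2")]), ("status", [("n3", "b")])]]

def Spec_outputIterations (iteration_results : List (List (String × List (String × String)))) (out : List (String × List (List String))) : Prop := out = outputIterations_alt iteration_results
instance (iteration_results : List (List (String × List (String × String)))) (out : List (String × List (List String))) : Decidable (Spec_outputIterations iteration_results out) := by unfold Spec_outputIterations; infer_instance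

-- ===== CLAIM (what is proved, stated in full; the proofs are below) =====
def Claim_equal_outputIterations : Prop := ∀ (iteration_results : List (List (String × List (String × String)))), Dom_outputIterations iteration_results → Pre_outputIterations iteration_results → Spec_outputIterations iteration_results (outputIterations iteration_results)

-- ===== LEMMAS AND PROOFS =====

-- a dict whose items are the keys ks each mapped through F (proof-only view of every dict both loops build)
def shaped {α : Type} (ks : List String) (F : String → α) : PySem.Dict String α :=
  PySem.Dict.mk (ks.map (fun k => (k, F k)))

theorem keys_shaped {α : Type} (ks : List String) (F : String → α) : (shaped ks F).keys = ks := by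
  simp [shaped, PySem.Dict.keys, Function.comp_def]

theorem shaped_insert {α : Type} (ks : List String) (F : String → α) (k : String) (v : α)
    (hk : k ∈ ks) :
    (shaped ks F).insert k v = shaped ks (fun j => if j = k then v else F j) := by
  apply PySem.Dict.ext
  rw [PySem.Dict.items_insert_of_contains]
  · simp only [shaped, List.map_map]
    refine List.map_congr_left (fun j _ => ?_)
    by_cases h : j = k <;> simp [h]
  · rw [PySem.Dict.contains_iff_mem_keys, keys_shaped]; exact hk

theorem shaped_get {α : Type} (ks : List String) (F : String → α) (k : String)
    (hnd : ks.Nodup) (hk : k ∈ ks) :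
    (shaped ks F).get? k = some (F k) := by
  apply PySem.Dict.get?_of_mem_items
  · exact List.mem_map_of_mem hk
  · rw [keys_shaped]; exact hnd

theorem shaped_congr {α : Type} (ks : List String) (F G : String → α)
    (h : ∀ k ∈ ks, F k = G k) : shaped ks F = shaped ks G := by
  apply PySem.Dict.ext
  exact List.map_congr_left (fun k hk => by rw [h k hk])

-- the init / final-build loop: insert (key, value-from-key) over a pair list from empty
theorem foldl_insert_keyfn {α : Type} (G : String → α) (l : List (String × String)) :
    l.foldl (fun d p => d.insert p.1 (G p.1)) PySem.Dict.empty
      = shaped (PySem.Set.ofList (l.map (·.1))) G := by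
  induction l using List.reverseRecOn with
  | nil => rfl
  | append_singleton l p ih =>
    rw [List.foldl_append, List.foldl_cons, List.foldl_nil, ih]
    simp only [List.map_append, List.map_cons, List.map_nil]
    rw [PySem.Set.ofList_append_singleton]
    by_cases h : p.1 ∈ PySem.Set.ofList (l.map (·.1))
    · rw [PySem.Set.add_of_mem h, shaped_insert _ _ _ _ h]
      refine shaped_congr _ _ _ (fun k _ => ?_)
      by_cases hk : k = p.1
      · subst hk; rw [if_pos rfl]
      · rw [if_neg hk]
    · rw [PySem.Set.add_of_not_mem h]
      apply PySem.Dict.ext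
      rw [PySem.Dict.items_insert_of_not_contains]
      · simp [shaped]
      · rw [Bool.eq_false_iff]
        rw [Ne, PySem.Dict.contains_iff_mem_keys, keys_shaped]
        exact h

-- the reset loop 'for keys in nodes_iter: nodes_iter[keys] = []'
theorem reset_shaped (js : List String) : ∀ (ks : List String) (F : String → List String),
    (∀ j ∈ js, j ∈ ks) →
    js.foldl (fun d k => d.insert k ([] : List String)) (shaped ks F)
      = shaped ks (fun k => if k ∈ js then [] else F k) := by
  induction js with
  | nil => intro ks F _; rw [List.foldl_nil]; exact (shaped_congr _ _ _ (fun k _ => by simp)).symm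
  | cons j js ih =>
    intro ks F hmem
    rw [List.foldl_cons, shaped_insert _ _ _ _ (hmem j (by simp)),
      ih ks _ (fun x hx => hmem x (by simp [hx]))]
    refine shaped_congr _ _ _ (fun k _ => ?_)
    by_cases h1 : k ∈ js
    · simp [h1]
    · by_cases h2 : k = j <;> simp [h1, h2]

-- the nodes picked out of l by looking their status up in stD
def grp (stD : PySem.Dict String String) (l : List (String × String)) (k : String) : List String :=
  (l.filter (fun p => stD.get? p.1 == some k)).map (·.1)

theorem aInner_shaped (stD : PySem.Dict String String) (l : List (String × String)) :
    ∀ (ks : List String) (F : String → List String), ks.Nodup →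
    (∀ p ∈ l, ∃ v, stD.get? p.1 = some v ∧ v ∈ ks) →
    aInner l stD (shaped ks F) = some (shaped ks (fun k => F k ++ grp stD l k)) := by
  induction l with
  | nil =>
    intro ks F _ _
    simp only [aInner, Option.some.injEq]
    exact shaped_congr _ _ _ (fun k _ => by simp [grp])
  | cons p l ih =>
    intro ks F hnd hvals
    obtain ⟨v, hv, hvk⟩ := hvals p (by simp)
    have hg := shaped_get ks F v hnd hvk
    simp only [aInner, hv, hg]
    rw [shaped_insert _ _ _ _ hvk, ih ks _ hnd (fun q hq => hvals q (by simp [hq]))]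
    refine congrArg some (shaped_congr _ _ _ (fun k _ => ?_))
    by_cases h : v = k
    · subst h; simp [grp, hv, List.append_assoc]
    · have : ¬ (stD.get? p.1 == some k) = true := by simp [hv]; exact fun e => h e
      simp [grp, this, Ne.symm h]

-- the copy loop 'for keys in nodes_iter: output[keys].append(nodes_iter[keys])'
theorem aAppend_shaped (js : List String) :
    ∀ (ks : List String) (niF : String → List String) (F : String → List (List String)),
    ks.Nodup → js.Nodup → (∀ j ∈ js, j ∈ ks) →
    aAppend js (shaped ks niF) (shaped ks F)
      = some (shaped ks (fun k => if k ∈ js then F k ++ [niF k] else F k)) := by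
  induction js with
  | nil =>
    intro ks niF F _ _ _
    simp only [aAppend, Option.some.injEq]
    exact shaped_congr _ _ _ (fun k _ => by simp)
  | cons j js ih =>
    intro ks niF F hnd hjnd hmem
    have hj : j ∈ ks := hmem j (by simp)
    have hg1 := shaped_get ks niF j hnd hj
    have hg2 := shaped_get ks F j hnd hj
    simp only [aAppend, hg1, hg2]
    rw [shaped_insert _ _ _ _ hj,
      ih ks niF _ hnd (List.Nodup.of_cons hjnd) (fun x hx => hmem x (by simp [hx]))]
    refine congrArg some (shaped_congr _ _ _ (fun k _ => ?_))
    have hjnotin : j ∉ js := (List.nodup_cons.mp hjnd).1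
    by_cases h1 : k ∈ js
    · have : k ≠ j := fun e => hjnotin (e ▸ h1)
      simp [h1, this]
    · by_cases h2 : k = j
      · subst h2; simp [hjnotin]
      · simp [h1, h2]

theorem aOuter_shaped (irs : List (List (String × List (String × String)))) :
    ∀ (ks : List String) (F : String → List (List String)) (niF : String → List String),
    ks.Nodup →
    (∀ it ∈ irs, ∃ st, (PySem.Dict.mk it).get? "status" = some st ∧
      ∀ p ∈ st, ∃ v, (PySem.Dict.mk st).get? p.1 = some v ∧ v ∈ ks) →
    aOuter irs (shaped ks F) (shaped ks niF)
      = some (shaped ks (fun k => F k ++ irs.map (fun it => bGroup (stOf it) k))) := by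
  induction irs with
  | nil =>
    intro ks F niF _ _
    simp only [aOuter, Option.some.injEq]
    exact shaped_congr _ _ _ (fun k _ => by simp)
  | cons it rest ih =>
    intro ks F niF hnd hgood
    obtain ⟨st, hst, hvals⟩ := hgood it (by simp)
    have hreset : List.foldl (fun d k => d.insert k ([] : List String)) (shaped ks niF) ks
        = shaped ks (fun _ => []) := by
      rw [reset_shaped ks ks niF (fun j hj => hj)]
      exact shaped_congr _ _ _ (fun k hk => by simp [hk])
    have hstOf : stOf it = st := by simp [stOf, hst]
    have hin := aInner_shaped (PySem.Dict.mk st) st ks (fun _ => ([] : List String)) hnd hvals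
    have hap := aAppend_shaped ks ks (fun k => [] ++ grp (PySem.Dict.mk st) st k) F hnd hnd (fun j hj => hj)
    rw [aOuter]
    simp only [keys_shaped, hreset, hst, hin, hap]
    rw [ih ks _ _ hnd (fun x hx => hgood x (by simp [hx]))]
    refine congrArg some (shaped_congr _ _ _ (fun k hk => ?_))
    have : bGroup (stOf it) k = grp (PySem.Dict.mk st) st k := by rw [hstOf]; rfl
    simp [hk, this, List.append_assoc]

theorem mapM_status (irs : List (List (String × List (String × String))))
    (h : ∀ it ∈ irs, (PySem.Dict.mk it).contains "status" = true) :
    irs.mapM (fun it => (PySem.Dict.mk it).get? "status") = some (irs.map stOf) := by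
  induction irs with
  | nil => rfl
  | cons it rest ih =>
    have hs := h it (by simp)
    rw [PySem.Dict.contains_eq_isSome_get?] at hs
    obtain ⟨st, hst⟩ := Option.isSome_iff_exists.mp hs
    rw [List.mapM_cons, hst, ih (fun x hx => h x (by simp [hx]))]
    simp [stOf, hst]

-- splitting A's single init loop over the pair of dicts
theorem foldl_pair_split {α β : Type} (l : List (String × String))
    (f : PySem.Dict String α → String → PySem.Dict String α)
    (g : PySem.Dict String β → String → PySem.Dict String β) :
    ∀ (d1 : PySem.Dict String α) (d2 : PySem.Dict String β),
    l.foldl (fun q p => (f q.1 p.1, g q.2 p.1)) (d1, d2) = (l.foldl (fun d p => f d p.1) d1, l.foldl (fun d p => g d p.1) d2) := by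
  induction l with
  | nil => intro d1 d2; rfl
  | cons p l ih => intro d1 d2; rw [List.foldl_cons, List.foldl_cons, List.foldl_cons, ih]

theorem main_equiv (it0 : List (String × List (String × String)))
    (rest : List (List (String × List (String × String))))
    (hnc : (PySem.Dict.mk it0).contains "node_count" = true)
    (hsts : ∀ it ∈ it0 :: rest, (PySem.Dict.mk it).contains "status" = true)
    (hvals : GoodVals_outputIterations (it0 :: rest)) :
    outputIterations (it0 :: rest) = outputIterations_alt (it0 :: rest) := by
  rw [PySem.Dict.contains_eq_isSome_get?] at hnc
  obtain ⟨nc, hncg⟩ := Option.isSome_iff_exists.mp hnc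
  have hget0 : PySem.List.pyGet? (it0 :: rest) 0 = some it0 := PySem.List.pyGet?_zero_cons _ _
  have hksnd : (PySem.Set.ofList (nc.map (·.1))).Nodup := PySem.Set.nodup_ofList _
  have hgood : ∀ it ∈ (it0 :: rest), ∃ st, (PySem.Dict.mk it).get? "status" = some st ∧
      ∀ p ∈ st, ∃ v, (PySem.Dict.mk st).get? p.1 = some v ∧ v ∈ PySem.Set.ofList (nc.map (·.1)) := by
    intro it hit
    have hcs := hsts it hit
    rw [PySem.Dict.contains_eq_isSome_get?] at hcs
    obtain ⟨st, hst⟩ := Option.isSome_iff_exists.mp hcs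
    refine ⟨st, hst, fun p hp => ?_⟩
    have hpk : (PySem.Dict.mk st).get? p.1 ≠ none := by
      intro hnone
      refine ((PySem.Dict.get?_eq_none_iff_not_mem_keys _ _).mp hnone) ?_
      simp only [PySem.Dict.keys, List.mem_map]
      exact ⟨p, hp, rfl⟩
    obtain ⟨v, hv⟩ := Option.ne_none_iff_exists'.mp hpk
    refine ⟨v, hv, ?_⟩
    have hstOf : stOf it = st := by simp [stOf, hst]
    have hgd := hvals it hit p (hstOf ▸ hp)
    rw [hstOf] at hgd
    rw [PySem.Dict.getD_of_get?_eq_some _ _ hv] at hgd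
    have hncOf : ncOf (it0 :: rest) = nc := by simp [ncOf, hncg]
    rw [hncOf] at hgd
    exact (PySem.Set.mem_ofList _ _).mpr hgd
  have hsplit := foldl_pair_split nc
    (fun d k => d.insert k ([] : List (List String)))
    (fun d k => d.insert k ([] : List String)) PySem.Dict.empty PySem.Dict.empty
  have hA := aOuter_shaped (it0 :: rest) (PySem.Set.ofList (nc.map (·.1)))
    (fun _ => []) (fun _ => []) hksnd hgood
  have hmapM := mapM_status (it0 :: rest) hsts
  rw [outputIterations, outputIterations_alt]
  simp only [hget0] at hncg ⊢
  rw [hncg]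
  simp only [hmapM, hsplit,
    foldl_insert_keyfn (fun _ => ([] : List (List String))) nc,
    foldl_insert_keyfn (fun _ => ([] : List String)) nc,
    foldl_insert_keyfn (fun k => (((it0 :: rest).map stOf).map (fun st => bGroup st k))) nc,
    hA]
  simp only [shaped]
  refine List.map_congr_left (fun k _ => ?_)
  simp [List.map_map]

-- ===== VERDICT (by name: the statement is the Claim_ definition above) =====
theorem outputIterations_spec : Claim_equal_outputIterations := by
  intro ir _ hpre
  obtain ⟨⟨hne, hnc, hsts⟩, hvals⟩ := hpre
  cases ir with
  | nil => exact absurd rfl hne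
  | cons it0 rest =>
    exact main_equiv it0 rest (by simpa using hnc) hsts hvals
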